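-- pv_equiv track=rewrite | github.com/feymanpaper/AppUIAutomator2Navigation | StateChecker.py | check_screen_list_order
-- ===== SOURCE A (Python) =====
-- def check_screen_list_order(k, screen_list) -> bool:
--     if k <= 1:
--         raise Exception
--     if screen_list is None or len(screen_list) == 0:
--         raise Exception
--     if len(screen_list) < k:
--         return False
--     # step为1, 2, 3
--     for step in range(1, 4, 1):
--         res = check_screen_list_by_pattern_order(k, screen_list, step)
--         if res is True:
--             return True
--     return False
--
-- def check_screen_list_by_pattern_order(k, screen_list, step) -> bool:
--     l = 0
--     for i in range(step):
--         l += 1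
--     for cnt in range(0, k - 1, 1):
--         for i in range(step):
--             if l >= len(screen_list):
--                 return False
--             elif screen_list[l] != screen_list[i]:
--                 return False
--             else:
--                 l += 1
--     return True
-- ===== SOURCE B (Python) =====
-- def check_screen_list_order(k, screen_list) -> bool:
--     if k <= 1:
--         raise Exception
--     if screen_list is None or len(screen_list) == 0:
--         raise Exception
--     if len(screen_list) < k:
--         return False
--     return any(step * k <= len(screen_list)
--                and screen_list[:step] * k == screen_list[:step * k]
--                for step in (1, 2, 3))
-- ===== Notes on version B (the rewrite author's own statement) =====
-- stated objective: simpler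
-- what changed: The index-walking helper with three nested loops and a carried pointer is replaced by a single any() over steps 1..3 that builds the step-prefix repeated k times and compares it to the corresponding slice in one whole-list comparison.
import Mathlib
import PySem

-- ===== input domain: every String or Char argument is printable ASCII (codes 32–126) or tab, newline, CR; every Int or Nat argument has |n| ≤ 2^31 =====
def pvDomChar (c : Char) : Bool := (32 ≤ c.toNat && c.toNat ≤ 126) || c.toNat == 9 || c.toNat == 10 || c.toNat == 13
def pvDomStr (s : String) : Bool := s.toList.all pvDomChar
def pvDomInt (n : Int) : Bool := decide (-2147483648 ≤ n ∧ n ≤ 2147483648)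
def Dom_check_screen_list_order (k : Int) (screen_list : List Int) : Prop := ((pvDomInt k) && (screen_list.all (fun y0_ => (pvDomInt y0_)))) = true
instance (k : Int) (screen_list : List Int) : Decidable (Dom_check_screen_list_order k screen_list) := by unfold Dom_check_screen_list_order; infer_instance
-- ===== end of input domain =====

-- B replaces A's pointer-walking nested loops by a repeated-prefix slice comparison (simpler, same cost).

-- ===== PORT A =====
-- inner 'for i in range(step)' loop of check_screen_list_by_pattern_order: returns the
-- advanced pointer l, or none for the early 'return False'
def pvInner (s : List Int) : List Int → Int → Option Int
  | [], l => some l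
  | i :: rest, l =>
    if (s.length : Int) ≤ l then none
    else if PySem.List.pyGetD s l 0 ≠ PySem.List.pyGetD s i 0 then none
    else pvInner s rest (l + 1)

-- outer 'for cnt in range(0, k-1, 1)' loop (the cnt value itself is unused by the body)
def pvOuter (s : List Int) (step : Int) : List Int → Int → Bool
  | [], _ => true
  | _ :: rest, l =>
    match pvInner s (PySem.List.pyRange 0 step 1) l with
    | none => false
    | some l' => pvOuter s step rest l'

def check_screen_list_by_pattern_order (k : Int) (screen_list : List Int) (step : Int) : Bool :=
  let l : Int := (PySem.List.pyRange 0 step 1).foldl (fun acc _ => acc + 1) 0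
  pvOuter screen_list step (PySem.List.pyRange 0 (k - 1) 1) l

-- 'for step in range(1, 4, 1)' loop of A with its early 'return True'
def pvSteps (k : Int) (screen_list : List Int) : List Int → Bool
  | [] => false
  | st :: rest =>
    if check_screen_list_by_pattern_order k screen_list st then true
    else pvSteps k screen_list rest

def check_screen_list_order (k : Int) (screen_list : List Int) : Bool :=
  if (screen_list.length : Int) < k then false
  else pvSteps k screen_list (PySem.List.pyRange 1 4 1)

-- ===== PORT B =====
-- Python 'xs * k'
def pvRepeat (xs : List Int) (k : Int) : List Int := (List.replicate k.toNat xs).flatten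

def check_screen_list_order_alt (k : Int) (screen_list : List Int) : Bool :=
  if (screen_list.length : Int) < k then false
  else [(1 : Int), 2, 3].any (fun step =>
    decide (step * k ≤ (screen_list.length : Int)) &&
    decide (pvRepeat (PySem.List.slice screen_list none (some step)) k
            = PySem.List.slice screen_list none (some (step * k))))

-- ===== PRECONDITION & SPEC =====
-- Pre_ excludes exactly the inputs where A raises: k <= 1 or an empty list.
def Pre_check_screen_list_order (k : Int) (screen_list : List Int) : Prop :=
  2 ≤ k ∧ screen_list ≠ []
instance (k : Int) (screen_list : List Int) : Decidable (Pre_check_screen_list_order k screen_list) := by unfold Pre_check_screen_list_order; infer_instance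
def pvWitness_check_screen_list_order : Int × List Int := (2, [5, 5])

def Spec_check_screen_list_order (k : Int) (screen_list : List Int) (out : Bool) : Prop := out = check_screen_list_order_alt k screen_list
instance (k : Int) (screen_list : List Int) (out : Bool) : Decidable (Spec_check_screen_list_order k screen_list out) := by unfold Spec_check_screen_list_order; infer_instance

-- ===== CLAIM (what is proved, stated in full; the proofs are below) =====
def Claim_equal_check_screen_list_order : Prop := ∀ (k : Int) (screen_list : List Int), Dom_check_screen_list_order k screen_list → Pre_check_screen_list_order k screen_list → Spec_check_screen_list_order k screen_list (check_screen_list_order k screen_list)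

-- ===== LEMMAS AND PROOFS =====
-- general counting fold: 'l = 0; for i in range(step): l += 1'
lemma pvFoldlIncr (xs : List Int) (i : Int) : xs.foldl (fun a _ => a + 1) i = i + xs.length := by
  induction xs generalizing i with
  | nil => simp
  | cons x xs ih => simp [List.foldl, ih]; ring

lemma pvGetDTake (s : List Int) (t i : Nat) (d : Int) (h : i < t) :
    (s.take t).getD i d = s.getD i d := by
  simp [List.getD, List.getElem?_take_of_lt h]

lemma pvIfOr (b c : Bool) : (if b then true else c) = (b || c) := by cases b <;> simp

-- value of the inner 'for i in range(step)' loop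
lemma pvInner_spec (s : List Int) : ∀ (sp a l : Nat),
    pvInner s (PySem.List.pyRange (a : Int) ((a : Int) + (sp : Int)) 1) (l : Int) =
      (if ∀ i < sp, l + i < s.length ∧ s.getD (l + i) 0 = s.getD (a + i) 0
       then some ((l : Int) + (sp : Int)) else none) := by
  intro sp
  induction sp with
  | zero =>
    intro a l
    rw [PySem.List.pyRange_one_eq_nil (by omega)]
    simp [pvInner]
  | succ sp ih =>
    intro a l
    rw [PySem.List.pyRange_one_cons (by omega)]
    rw [pvInner]
    have harg : (a : Int) + 1 = ((a + 1 : Nat) : Int) := by push_cast; ring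
    have harg2 : (a : Int) + ((sp + 1 : Nat) : Int) = ((a + 1 : Nat) : Int) + ((sp : Nat) : Int) := by
      push_cast; ring
    by_cases hlen : (s.length : Int) ≤ (l : Int)
    · rw [if_pos hlen, if_neg]
      intro hall
      have := (hall 0 (by omega)).1
      omega
    · rw [if_neg hlen]
      have hl : (l : Nat) < s.length := by exact_mod_cast not_le.mp hlen
      by_cases heq : s.getD l 0 = s.getD a 0
      · rw [if_neg (show ¬(PySem.List.pyGetD s (l : Int) 0 ≠ PySem.List.pyGetD s (a : Int) 0) by
          simp only [PySem.List.pyGetD_natCast, ne_eq, not_not]; exact heq)]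
        rw [harg2, harg, show ((l : Int) + 1) = ((l + 1 : Nat) : Int) by push_cast; ring]
        rw [ih (a + 1) (l + 1)]
        have hiff : (∀ i < sp, l + 1 + i < s.length ∧ s.getD (l + 1 + i) 0 = s.getD (a + 1 + i) 0) ↔
            (∀ i < sp + 1, l + i < s.length ∧ s.getD (l + i) 0 = s.getD (a + i) 0) := by
          constructor
          · intro h' i hi
            match i with
            | 0 => simpa using And.intro hl heq
            | Nat.succ i' =>
              have := h' i' (by omega)
              have e1 : l + (i' + 1) = l + 1 + i' := by omega
              have e2 : a + (i' + 1) = a + 1 + i' := by omega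
              rw [e1, e2]
              exact this
          · intro h i hi
            have := h (i + 1) (by omega)
            have e1 : l + (i + 1) = l + 1 + i := by omega
            have e2 : a + (i + 1) = a + 1 + i := by omega
            rw [← e1, ← e2]
            exact this
        rw [if_congr hiff rfl rfl, show ((l + 1 : Nat) : Int) + ((sp : Nat) : Int) = (l : Int) + ((sp + 1 : Nat) : Int) by push_cast; ring]
      · rw [if_pos (show PySem.List.pyGetD s (l : Int) 0 ≠ PySem.List.pyGetD s (a : Int) 0 by
          simp only [PySem.List.pyGetD_natCast, ne_eq]; exact heq), if_neg]
        intro hall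
        have := (hall 0 (by omega)).2
        simp only [Nat.add_zero] at this
        exact heq this

-- value of the outer 'for cnt in range(0, k-1)' loop
lemma pvOuter_spec (s : List Int) (sp : Nat) : ∀ (cnts : List Int) (l : Nat),
    pvOuter s (sp : Int) cnts (l : Int) =
      decide (∀ j < cnts.length * sp, l + j < s.length ∧ s.getD (l + j) 0 = s.getD (j % sp) 0) := by
  intro cnts
  induction cnts with
  | nil => intro l; simp [pvOuter]
  | cons c rest ih =>
    intro l
    rw [pvOuter]
    rw [show PySem.List.pyRange 0 (sp : Int) 1 =
          PySem.List.pyRange ((0 : Nat) : Int) (((0 : Nat) : Int) + (sp : Int)) 1 by norm_num]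
    rw [pvInner_spec s sp 0 l]
    have hmul : (rest.length + 1) * sp = sp + rest.length * sp := by ring
    by_cases hC : ∀ i < sp, l + i < s.length ∧ s.getD (l + i) 0 = s.getD (0 + i) 0
    · rw [if_pos hC]
      rw [show (l : Int) + (sp : Int) = ((l + sp : Nat) : Int) by push_cast; ring]
      show pvOuter s (sp : Int) rest ((l + sp : Nat) : Int) = _
      rw [ih (l + sp)]
      apply decide_eq_decide.mpr
      constructor
      · intro h2 j hj
        simp only [List.length_cons] at hj ⊢
        by_cases hjs : j < sp
        · have := hC j hjs
          rw [Nat.mod_eq_of_lt hjs]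
          simp only [Nat.zero_add] at this
          exact this
        · have hb := h2 (j - sp) (by omega)
          have e1 : l + sp + (j - sp) = l + j := by omega
          rw [e1] at hb
          rw [Nat.mod_eq_sub_mod (by omega)]
          exact hb
      · intro h j hj
        have hb := h (sp + j) (by simp only [List.length_cons]; omega)
        have e1 : l + (sp + j) = l + sp + j := by omega
        rw [e1, Nat.add_mod_left] at hb
        exact hb
    · rw [if_neg hC]
      show false = _
      symm
      apply decide_eq_false
      push Not at hC
      obtain ⟨i, hi, hfail⟩ := hC
      intro hbig
      have hsple : sp ≤ (rest.length + 1) * sp := by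
        calc sp = 1 * sp := by ring
        _ ≤ (rest.length + 1) * sp := Nat.mul_le_mul_right _ (by omega)
      have hb := hbig i (by simp only [List.length_cons]; omega)
      rw [Nat.mod_eq_of_lt hi] at hb
      exact hfail hb.1 (by rw [Nat.zero_add]; exact hb.2)

-- A's helper at a step and repeat-count given as casts of naturals, characterised
lemma patA_spec (s : List Int) (sp K : Nat) (hsp : 0 < sp) (hK : 2 ≤ K) :
    check_screen_list_by_pattern_order (K : Int) s (sp : Int) =
      decide (sp * K ≤ s.length ∧
        ∀ m, sp ≤ m → m < K * sp → s.getD m 0 = s.getD (m % sp) 0) := by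
  unfold check_screen_list_by_pattern_order
  rw [pvFoldlIncr, PySem.List.length_pyRange_one]
  rw [show (0 : Int) + ((((sp : Int)) - 0).toNat : Int) = ((sp : Nat) : Int) by simp]
  rw [pvOuter_spec s sp _ sp, PySem.List.length_pyRange_one]
  rw [show (((K : Int) - 1) - 0).toNat = K - 1 by omega]
  apply decide_eq_decide.mpr
  have hKsp : sp + (K - 1) * sp = K * sp := by
    cases K with
    | zero => omega
    | succ K' => simp; ring
  have hpos : 0 < (K - 1) * sp := Nat.mul_pos (by omega) hsp
  constructor
  · intro h
    constructor
    · have := (h ((K - 1) * sp - 1) (by omega)).1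
      have hc : sp * K = K * sp := by ring
      omega
    · intro m hm1 hm2
      have hb := (h (m - sp) (by omega)).2
      have e1 : sp + (m - sp) = m := by omega
      rw [e1, ← Nat.mod_eq_sub_mod hm1] at hb
      exact hb
  · intro ⟨hn, hpat⟩ j hj
    have hc : sp * K = K * sp := by ring
    refine ⟨by omega, ?_⟩
    have := hpat (sp + j) (by omega) (by omega)
    rw [Nat.add_mod_left] at this
    exact this

-- getD of the k-fold repetition of the pattern
lemma pvFlatRepGetD (p : List Int) : ∀ (K i : Nat), i < K * p.length →
    ((List.replicate K p).flatten).getD i 0 = p.getD (i % p.length) 0 := by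
  intro K
  induction K with
  | zero => intro i h; simp at h
  | succ K ih =>
    intro i h
    have hmul : (K + 1) * p.length = p.length + K * p.length := by ring
    rw [hmul] at h
    rw [List.replicate_succ, List.flatten_cons]
    by_cases hi : i < p.length
    · rw [List.getD_append _ _ _ _ hi, Nat.mod_eq_of_lt hi]
    · have hp : 0 < p.length := by
        rcases Nat.eq_zero_or_pos p.length with h0 | h0
        · rw [h0] at h; simp at h
        · exact h0
      rw [List.getD_append_right _ _ _ _ (by omega)]
      have harg : i - p.length < K * p.length := by omega
      rw [ih (i - p.length) harg]
      conv_rhs => rw [Nat.mod_eq_sub_mod (by omega : p.length ≤ i)]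

-- B's per-step test, characterised the same way
lemma patB_spec (s : List Int) (sp K : Nat) (hsp : 0 < sp) (hK : 2 ≤ K) :
    (decide ((sp : Int) * (K : Int) ≤ (s.length : Int)) &&
     decide (pvRepeat (PySem.List.slice s none (some (sp : Int))) (K : Int)
             = PySem.List.slice s none (some ((sp : Int) * (K : Int))))) =
      decide (sp * K ≤ s.length ∧
        ∀ m, sp ≤ m → m < K * sp → s.getD m 0 = s.getD (m % sp) 0) := by
  rw [show ((sp : Int) * (K : Int)) = ((sp * K : Nat) : Int) by push_cast; ring]
  rw [PySem.List.slice_to_natCast, PySem.List.slice_to_natCast]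
  unfold pvRepeat
  simp only [Int.toNat_natCast]
  rw [← Bool.decide_and]
  apply decide_eq_decide.mpr
  rw [Nat.cast_le]
  apply and_congr_right
  intro hn
  have hspn : sp ≤ s.length := by
    have : sp * 1 ≤ sp * K := Nat.mul_le_mul_left _ (by omega)
    omega
  have hlenp : (s.take sp).length = sp := by simp [hspn]
  have hc : sp * K = K * sp := by ring
  constructor
  · intro heq m hm1 hm2
    have hgd := congrArg (fun t => t.getD m 0) heq
    simp only at hgd
    rw [pvFlatRepGetD _ _ _ (by rw [hlenp]; omega), hlenp] at hgd
    rw [pvGetDTake s sp (m % sp) 0 (Nat.mod_lt _ hsp)] at hgd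
    rw [pvGetDTake s (sp * K) m 0 (by omega)] at hgd
    exact hgd.symm
  · intro hpat
    apply List.ext_getElem
    · simp [hlenp, hc]
      omega
    · intro i h1 h2
      have hlf : (List.replicate K (s.take sp)).flatten.length = K * sp := by simp [hlenp]
      have hi : i < K * sp := by omega
      rw [← List.getD_eq_getElem _ 0 h1, ← List.getD_eq_getElem _ 0 h2]
      rw [pvFlatRepGetD _ _ _ (by rw [hlenp]; omega), hlenp]
      rw [pvGetDTake s sp (i % sp) 0 (Nat.mod_lt _ hsp)]
      rw [pvGetDTake s (sp * K) i 0 (by omega)]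
      by_cases his : i < sp
      · rw [Nat.mod_eq_of_lt his]
      · exact (hpat i (by omega) hi).symm

lemma pat_step (s : List Int) (K : Nat) (hK : 2 ≤ K) (sp : Nat) (hsp : 0 < sp) :
    check_screen_list_by_pattern_order (K : Int) s (sp : Int) =
      (decide ((sp : Int) * (K : Int) ≤ (s.length : Int)) &&
       decide (pvRepeat (PySem.List.slice s none (some (sp : Int))) (K : Int)
               = PySem.List.slice s none (some ((sp : Int) * (K : Int))))) := by
  rw [patA_spec s sp K hsp hK, patB_spec s sp K hsp hK]

-- ===== VERDICT (by name: the statement is the Claim_ definition above) =====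
theorem check_screen_list_order_spec : Claim_equal_check_screen_list_order := by
  intro k s hdom hpre
  obtain ⟨hk2, hne⟩ := hpre
  unfold Spec_check_screen_list_order
  obtain ⟨K, rfl⟩ : ∃ K : Nat, k = (K : Int) := ⟨k.toNat, (Int.toNat_of_nonneg (by omega)).symm⟩
  have hK2 : 2 ≤ K := by exact_mod_cast hk2
  unfold check_screen_list_order check_screen_list_order_alt
  by_cases hlt : (s.length : Int) < (K : Int)
  · rw [if_pos hlt, if_pos hlt]
  · rw [if_neg hlt, if_neg hlt]
    rw [show PySem.List.pyRange 1 4 1 = [1, 2, 3] by decide]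
    have e1 := pat_step s K hK2 1 (by omega)
    have e2 := pat_step s K hK2 2 (by omega)
    have e3 := pat_step s K hK2 3 (by omega)
    norm_num at e1 e2 e3
    simp only [pvSteps, List.any_cons, List.any_nil, e1, e2, e3, pvIfOr]
    simp
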